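-- pv_equiv track=rewrite | github.com/daniel-reich/ubiquitous-fiesta | bdsWZ29zJfJ2Roymv_17.py | swap_two
-- ===== SOURCE A (Python) =====
-- def swap_two(txt):
--   result, x= "", 0
--   while x < len(txt):
--     a, b = "", ""
--     if x + 4 <= len(txt):
--       a += txt[x]
--       a += txt[x+1]
--       b += txt[x+2]
--       b += txt[x+3]
--       a, b = b, a
--       result += a + b
--       x += 4
--     else:
--       result += txt[x]
--       x += 1
--   return result
-- ===== SOURCE B (Python) =====
-- def swap_two(txt):
--   n = len(txt) // 4
--   return ''.join(txt[4*k+2:4*k+4] + txt[4*k:4*k+2] for k in range(n)) + txt[4*n:]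
-- ===== Notes on version B (the rewrite author's own statement) =====
-- stated objective: faster
-- what changed: Replaces the char-by-char index walk with one str.join over whole 4-char block slices (swapped-half slices per block) plus a single remainder slice.
import Mathlib
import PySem

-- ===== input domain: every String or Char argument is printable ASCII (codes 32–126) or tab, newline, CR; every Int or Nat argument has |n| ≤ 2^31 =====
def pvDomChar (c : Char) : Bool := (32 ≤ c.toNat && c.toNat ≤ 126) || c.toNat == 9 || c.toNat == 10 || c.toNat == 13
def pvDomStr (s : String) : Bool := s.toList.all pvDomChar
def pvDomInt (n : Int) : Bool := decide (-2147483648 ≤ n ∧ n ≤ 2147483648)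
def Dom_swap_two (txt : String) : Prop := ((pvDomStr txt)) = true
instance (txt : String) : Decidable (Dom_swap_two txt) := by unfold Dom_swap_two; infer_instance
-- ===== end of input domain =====

-- B swaps the halves of each complete 4-char block with whole-block slices joined in one pass,
-- then appends the remainder slice verbatim; one honest line: same O(n) work, plainer decomposition.

-- ===== PORT A =====
-- the while loop of A: state (result, x); strings are modelled as List Char,
-- txt[i] (always in range here) as List.getD
def swapLoop (txt : List Char) (result : List Char) (x : Nat) : List Char :=
  if x < txt.length then
    if x + 4 ≤ txt.length then
      -- a = txt[x] + txt[x+1]; b = txt[x+2] + txt[x+3]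
      let a := [txt.getD x ' ', txt.getD (x+1) ' ']
      let b := [txt.getD (x+2) ' ', txt.getD (x+3) ' ']
      -- a, b = b, a ; result += a + b
      swapLoop txt (result ++ (b ++ a)) (x + 4)
    else
      swapLoop txt (result ++ [txt.getD x ' ']) (x + 1)
  else result
termination_by txt.length - x

def swap_two (txt : String) : String := String.ofList (swapLoop txt.toList [] 0)

-- ===== PORT B =====
-- n = len(txt) // 4 (a length is nonnegative, so Nat division is Python's //);
-- ''.join(generator) over range(n) is flatMap over List.range n; slices are PySem.List.slice
def swap_two_alt (txt : String) : String :=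
  let l := txt.toList
  let n : Nat := l.length / 4
  String.ofList
    (((List.range n).flatMap (fun k =>
        PySem.List.slice l (some ((4*k+2 : Nat) : Int)) (some ((4*k+4 : Nat) : Int)) ++
        PySem.List.slice l (some ((4*k : Nat) : Int)) (some ((4*k+2 : Nat) : Int)))) ++
      PySem.List.slice l (some ((4*n : Nat) : Int)) none)

-- ===== PRECONDITION & SPEC =====
def Spec_swap_two (txt : String) (out : String) : Prop := out = swap_two_alt txt
instance (txt : String) (out : String) : Decidable (Spec_swap_two txt out) := by unfold Spec_swap_two; infer_instance

-- ===== CLAIM (what is proved, stated in full; the proofs are below) =====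
def Claim_equal_swap_two : Prop := ∀ (txt : String), Dom_swap_two txt → Spec_swap_two txt (swap_two txt)

-- ===== LEMMAS AND PROOFS =====

-- the common value of both programs: swap the halves of each leading 4-block, keep the short tail
def chunkSwap : List Char → List Char
  | c1 :: c2 :: c3 :: c4 :: rest => c3 :: c4 :: c1 :: c2 :: chunkSwap rest
  | rest => rest

theorem chunkSwap_short (l : List Char) (h : l.length < 4) : chunkSwap l = l := by
  match l with
  | [] => rfl
  | [_] => rfl
  | [_, _] => rfl
  | [_, _, _] => rfl
  | _ :: _ :: _ :: _ :: _ => simp at h; omega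

theorem swapLoop_eq (l res : List Char) (x : Nat) :
    swapLoop l res x = res ++ chunkSwap (l.drop x) := by
  induction res, x using swapLoop.induct l with
  | case1 res x hx h4 a b ih =>
      rw [swapLoop]
      simp only [if_pos hx, if_pos h4]
      rw [ih]
      have h0 : x < l.length := hx
      have h1 : x + 1 < l.length := by omega
      have h2 : x + 2 < l.length := by omega
      have h3 : x + 3 < l.length := by omega
      rw [List.drop_eq_getElem_cons h0, List.drop_eq_getElem_cons h1,
          show x+1+1 = x+2 by omega, List.drop_eq_getElem_cons h2,
          show x+2+1 = x+3 by omega, List.drop_eq_getElem_cons h3,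
          show x+3+1 = x+4 by omega]
      simp [a, b, chunkSwap, h0, h1, h2, h3]
  | case2 res x hx h4 ih =>
      rw [swapLoop]
      simp only [if_pos hx, if_neg h4]
      rw [ih]
      rw [chunkSwap_short (l.drop (x+1)) (by simp; omega),
          chunkSwap_short (l.drop x) (by simp; omega),
          List.drop_eq_getElem_cons hx, List.getD_eq_getElem l ' ' hx]
      simp
  | case3 res x hx =>
      rw [swapLoop]
      simp [hx, List.drop_eq_nil_of_le (le_of_not_gt hx), chunkSwap]

theorem drop_add_four (c1 c2 c3 c4 : Char) (rest : List Char) (m : Nat) :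
    (c1 :: c2 :: c3 :: c4 :: rest).drop (m + 4) = rest.drop m := by
  rw [Nat.add_comm m 4, ← List.drop_drop]
  rfl

theorem alt_eq (l : List Char) :
    ((List.range (l.length / 4)).flatMap (fun k =>
        (l.drop (4*k+2)).take 2 ++ (l.drop (4*k)).take 2)) ++ l.drop (4*(l.length/4)) =
      chunkSwap l := by
  induction l using chunkSwap.induct with
  | case1 c1 c2 c3 c4 rest ih =>
      have hlen : (c1 :: c2 :: c3 :: c4 :: rest).length = rest.length + 4 := by simp
      rw [hlen, Nat.add_div_right rest.length (by norm_num), List.range_succ_eq_map,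
          List.flatMap_cons, List.flatMap_map]
      have hb : ∀ k, ((c1 :: c2 :: c3 :: c4 :: rest).drop (4*(k+1)+2)).take 2 ++
            ((c1 :: c2 :: c3 :: c4 :: rest).drop (4*(k+1))).take 2 =
          (rest.drop (4*k+2)).take 2 ++ (rest.drop (4*k)).take 2 := by
        intro k
        rw [show 4*(k+1)+2 = (4*k+2)+4 by ring, show 4*(k+1) = (4*k)+4 by ring,
            drop_add_four, drop_add_four]
      have hflat : (List.range (rest.length / 4)).flatMap
            (fun k => ((c1 :: c2 :: c3 :: c4 :: rest).drop (4*(k+1)+2)).take 2 ++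
                      ((c1 :: c2 :: c3 :: c4 :: rest).drop (4*(k+1))).take 2) =
          (List.range (rest.length / 4)).flatMap
            (fun k => (rest.drop (4*k+2)).take 2 ++ (rest.drop (4*k)).take 2) := by
        exact List.flatMap_congr (fun k _ => hb k)
      have hrem : (c1 :: c2 :: c3 :: c4 :: rest).drop (4*(rest.length/4 + 1)) =
          rest.drop (4*(rest.length/4)) := by
        rw [show 4*(rest.length/4 + 1) = 4*(rest.length/4) + 4 by ring, drop_add_four]
      simp only [Nat.succ_eq_add_one, hflat, hrem, chunkSwap]
      rw [← ih]
      simp [List.take, List.drop]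
  | case2 rest h =>
      have hlen : rest.length < 4 := by
        rcases rest with _ | ⟨a, _ | ⟨b, _ | ⟨c, _ | ⟨d, r⟩⟩⟩⟩
        · simp
        · simp
        · simp
        · simp
        · exact absurd (h a b c d r rfl) (fun x => x)
      rw [Nat.div_eq_of_lt hlen]
      simp [chunkSwap_short rest hlen]

-- ===== VERDICT (by name: the statement is the Claim_ definition above) =====
theorem swap_two_spec : Claim_equal_swap_two := by
  intro txt _
  unfold Spec_swap_two swap_two swap_two_alt
  rw [swapLoop_eq]
  simp only [List.nil_append, List.drop_zero]
  congr 1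
  rw [← alt_eq txt.toList]
  congr 1
  · apply List.flatMap_congr
    intro k _
    rw [PySem.List.slice_natCast, PySem.List.slice_natCast]
    simp [Nat.add_sub_add_left]
  · rw [PySem.List.slice_from_natCast]
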